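-- pv_equiv track=rewrite | github.com/trdenton/gtranspose | main.py | translate_line
-- ===== SOURCE A (Python) =====
-- def get_next_string(note):
--     if note == 'e':
--         return 'B'
--     if note == 'B':
--         return 'G'
--     if note == 'G':
--         return 'D'
--     if note == 'D':
--         return 'A'
--     if note == 'A':
--         return 'E'
--     return '?'
--
-- def translate_line(line: str, offs: int):
--     #notes = line.split("-")
--     note = line[0]
--     offset_fret_next_string = 5
--     next_string_note = get_next_string(note)
--     if note == 'B':
--         offset_fret_next_string = 4
--
--     cur_fret = ""
--     out_string = ""
--     next_string_line = ""
--     for l in line: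
--         if l.isnumeric():
--             cur_fret = cur_fret + l
--         else:
--             # not numeric
--             # do the processing
--             if cur_fret != "":
--                 old_fret = cur_fret
--                 cur_fret_i = int(cur_fret)
--                 new_fret_i = cur_fret_i + offs
--                 new_fret = str(new_fret_i)
--                 next_string_fret = '-'*len(old_fret)
--                 if new_fret_i < 0:
--                     new_fret = '-'*len(old_fret)
--                     next_string_fret = str(new_fret_i + offset_fret_next_string)
--                 if len(new_fret) < len(old_fret):
--                     new_fret = '-' +new_fret
--                 if len(next_string_fret) < len(old_fret):
--                     next_string_fret = "-" + next_string_fret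
--                 out_string = out_string + new_fret
--                 next_string_line = next_string_line + next_string_fret
--
--             out_string = out_string + l
--             next_string_line = next_string_line + l
--             cur_fret = ""
--     next_string_line = next_string_note + next_string_line[1:]
--     return out_string.rstrip(), next_string_line.rstrip()
-- ===== SOURCE B (Python) =====
-- def get_next_string(note):
--     if note == 'e':
--         return 'B'
--     if note == 'B':
--         return 'G'
--     if note == 'G':
--         return 'D'
--     if note == 'D':
--         return 'A'
--     if note == 'A':
--         return 'E'
--     return '?'
--
-- def translate_line(line: str, offs: int):
--     shift = 4 if line[0] == 'B' else 5
--     # phase 1: tokenize into (fret-digit-run, terminating non-digit) pairs with a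
--     # two-pointer scan; a trailing digit run has no terminator and yields no token.
--     tokens = []
--     i, n = 0, len(line)
--     while i < n:
--         j = i
--         while j < n and line[j].isnumeric():
--             j += 1
--         if j < n:
--             tokens.append((line[i:j], line[j]))
--         i = j + 1
--     # phase 2: render each token independently into its (main, next-string) piece
--     def render(fret, ch):
--         if fret == "":
--             return ch, ch
--         v = int(fret) + offs
--         if v < 0:
--             main, nxt = '-' * len(fret), str(v + shift)
--         else:
--             main, nxt = str(v), '-' * len(fret)
--         if len(main) < len(fret):
--             main = '-' + main
--         if len(nxt) < len(fret):
--             nxt = '-' + nxt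
--         return main + ch, nxt + ch
--     pieces = [render(f, c) for f, c in tokens]
--     out = ''.join(p[0] for p in pieces)
--     nxt_line = get_next_string(line[0]) + ''.join(p[1] for p in pieces)[1:]
--     return out.rstrip(), nxt_line.rstrip()
-- ===== Notes on version B (the rewrite author's own statement) =====
-- stated objective: alternative
-- what changed: Replaces A's single stateful char-by-char loop (digit accumulator + two growing output strings) by a two-phase pipeline: a two-pointer tokenizer producing (fret-run, terminator) pairs, then an independent per-token renderer whose pieces are joined; same O(n) cost.
-- outside the precondition, e.g. on translate_line('', 2): A raises IndexError, B raises IndexError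
import Mathlib
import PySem

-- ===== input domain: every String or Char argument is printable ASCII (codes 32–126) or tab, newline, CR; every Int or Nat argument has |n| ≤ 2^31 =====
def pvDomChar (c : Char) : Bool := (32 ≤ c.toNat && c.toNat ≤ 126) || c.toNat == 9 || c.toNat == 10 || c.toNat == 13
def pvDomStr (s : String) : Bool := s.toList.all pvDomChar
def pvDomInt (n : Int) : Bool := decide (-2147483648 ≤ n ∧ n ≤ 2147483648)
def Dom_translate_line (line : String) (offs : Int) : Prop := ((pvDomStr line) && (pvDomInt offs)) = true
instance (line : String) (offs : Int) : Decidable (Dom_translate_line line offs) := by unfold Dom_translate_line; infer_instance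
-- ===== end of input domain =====

-- B rebuilds the line in two phases — tokenize (fret-run, terminator) pairs with a two-pointer
-- scan, then render each token independently and join — instead of A's single stateful
-- char-by-char accumulator loop; objective: alternative decomposition, same cost.


-- shared module helper get_next_string (identical if-chain in Source A and Source B)
def get_next_string (note : Char) : Char :=
  if note = 'e' then 'B'
  else if note = 'B' then 'G'
  else if note = 'G' then 'D'
  else if note = 'D' then 'A'
  else if note = 'A' then 'E'
  else '?'

-- ===== PORT A =====
-- the flush of a completed fret run (A's body of `if cur_fret != ""`), main-string side.
-- int(cur_fret): cur is always a nonempty digit run here, so ofChars? is some; getD 0 is unreachable.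
def flushMainA (offs : Int) (cur : List Char) : List Char :=
  let new_fret_i := (PySem.Int.ofChars? cur).getD 0 + offs
  let new_fret := if new_fret_i < 0 then List.replicate cur.length '-' else PySem.Int.toChars new_fret_i
  if new_fret.length < cur.length then '-' :: new_fret else new_fret

def flushNextA (offs shift : Int) (cur : List Char) : List Char :=
  let new_fret_i := (PySem.Int.ofChars? cur).getD 0 + offs
  let next_string_fret := if new_fret_i < 0 then PySem.Int.toChars (new_fret_i + shift) else List.replicate cur.length '-'
  if next_string_fret.length < cur.length then '-' :: next_string_fret else next_string_fret

-- one iteration of A's `for l in line` over state (cur_fret, out_string, next_string_line)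
def stepA (offs shift : Int) (st : List Char × List Char × List Char) (l : Char) :
    List Char × List Char × List Char :=
  if PySem.Chars.isdigit l then (st.1 ++ [l], st.2.1, st.2.2)  -- l.isnumeric() on ASCII = isdigit
  else
    let p := if st.1 ≠ [] then (st.2.1 ++ flushMainA offs st.1, st.2.2 ++ flushNextA offs shift st.1)
             else (st.2.1, st.2.2)
    ([], p.1 ++ [l], p.2 ++ [l])

def translate_line (line : String) (offs : Int) : String × String :=
  match line.toList with
  | [] => ("", "")  -- unreachable under Pre_: Python raises IndexError at line[0]
  | note :: _ =>
    let shift : Int := if note = 'B' then 4 else 5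
    let next_string_note := get_next_string note
    let r := line.toList.foldl (stepA offs shift) ([], [], [])
    let next_string_line := next_string_note :: r.2.2.drop 1
    (String.mk (PySem.Chars.rstrip r.2.1), String.mk (PySem.Chars.rstrip next_string_line))

-- ===== PORT B =====
-- Source B phase 1: two-pointer tokenizer; each step takes the leading digit run and its
-- terminator (span/drop = the inner `while j < n and line[j].isnumeric()` scan + slice).
def tokenizeB (cs : List Char) : List (List Char × Char) :=
  match h : cs.dropWhile (fun c => PySem.Chars.isdigit c) with
  | [] => []
  | c :: rest => (cs.takeWhile (fun c => PySem.Chars.isdigit c), c) :: tokenizeB rest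
termination_by cs.length
decreasing_by
  have h1 : (cs.dropWhile (fun c => PySem.Chars.isdigit c)).length ≤ cs.length :=
    cs.length_dropWhile_le _
  simp [h] at h1; omega

-- Source B phase 2: render one token
def renderB (offs shift : Int) (t : List Char × Char) : List Char × List Char :=
  if t.1 = [] then ([t.2], [t.2])
  else
    let v := (PySem.Int.ofChars? t.1).getD 0 + offs  -- int(fret): fret is a nonempty digit run
    let main := if v < 0 then List.replicate t.1.length '-' else PySem.Int.toChars v
    let nxt := if v < 0 then PySem.Int.toChars (v + shift) else List.replicate t.1.length '-'
    let main := if main.length < t.1.length then '-' :: main else main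
    let nxt := if nxt.length < t.1.length then '-' :: nxt else nxt
    (main ++ [t.2], nxt ++ [t.2])

def translate_line_alt (line : String) (offs : Int) : String × String :=
  match line.toList with
  | [] => ("", "")  -- unreachable under Pre_: Python raises IndexError at line[0]
  | note :: _ =>
    let shift : Int := if note = 'B' then 4 else 5
    let pieces := (tokenizeB line.toList).map (renderB offs shift)
    let out := (pieces.map Prod.fst).flatten
    let nxt := get_next_string note :: ((pieces.map Prod.snd).flatten).drop 1
    (String.mk (PySem.Chars.rstrip out), String.mk (PySem.Chars.rstrip nxt))

-- ===== PRECONDITION & SPEC =====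
-- Pre_ excludes only the empty line, on which A (line[0]) raises IndexError.
def Pre_translate_line (line : String) (offs : Int) : Prop := line ≠ ""
instance (line : String) (offs : Int) : Decidable (Pre_translate_line line offs) := by
  unfold Pre_translate_line; infer_instance
def pvWitness_translate_line : String × Int := ("e|--3--5-|", 2)

def Spec_translate_line (line : String) (offs : Int) (out : String × String) : Prop := out = translate_line_alt line offs
instance (line : String) (offs : Int) (out : String × String) : Decidable (Spec_translate_line line offs out) := by unfold Spec_translate_line; infer_instance

-- ===== CLAIM (what is proved, stated in full; the proofs are below) =====
def Claim_equal_translate_line : Prop := ∀ (line : String) (offs : Int), Dom_translate_line line offs → Pre_translate_line line offs → Spec_translate_line line offs (translate_line line offs)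

-- ===== LEMMAS AND PROOFS =====

-- tokenizer with a pending digit-run accumulator: what A's loop implicitly builds
def tokP (pend : List Char) : List Char → List (List Char × Char)
  | [] => []
  | c :: cs => if PySem.Chars.isdigit c then tokP (pend ++ [c]) cs else (pend, c) :: tokP [] cs

lemma renderB_eq (offs shift : Int) (fret : List Char) (c : Char) :
    renderB offs shift (fret, c) =
      ((if fret = [] then [] else flushMainA offs fret) ++ [c],
       (if fret = [] then [] else flushNextA offs shift fret) ++ [c]) := by
  by_cases h : fret = [] <;> simp [renderB, flushMainA, flushNextA, h]

lemma foldA_eq (offs shift : Int) (cs : List Char) :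
    ∀ (cur out nxt : List Char), ∃ r,
      cs.foldl (stepA offs shift) (cur, out, nxt) =
        (r, out ++ (((tokP cur cs).map (renderB offs shift)).map Prod.fst).flatten,
            nxt ++ (((tokP cur cs).map (renderB offs shift)).map Prod.snd).flatten) := by
  induction cs with
  | nil => intro cur out nxt; exact ⟨cur, by simp [tokP]⟩
  | cons c cs ih =>
    intro cur out nxt
    by_cases hd : PySem.Chars.isdigit c
    · simpa [tokP, hd, stepA] using ih (cur ++ [c]) out nxt
    · obtain ⟨r, hr⟩ := ih [] (out ++ ((if cur = [] then [] else flushMainA offs cur) ++ [c]))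
        (nxt ++ ((if cur = [] then [] else flushNextA offs shift cur) ++ [c]))
      refine ⟨r, ?_⟩
      by_cases hc : cur = [] <;>
        simpa [tokP, hd, stepA, hc, renderB_eq, List.append_assoc] using hr

lemma tokP_eq_tokenizeB (cs : List Char) :
    ∀ pend, tokP pend cs =
      (match cs.dropWhile (fun c => PySem.Chars.isdigit c) with
       | [] => []
       | c :: rest => (pend ++ cs.takeWhile (fun c => PySem.Chars.isdigit c), c) :: tokenizeB rest) := by
  induction cs with
  | nil => intro pend; simp [tokP]
  | cons c cs ih =>
    intro pend
    by_cases hd : PySem.Chars.isdigit c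
    · rw [List.dropWhile_cons_of_pos (by simpa using hd), List.takeWhile_cons_of_pos (by simpa using hd)]
      rw [tokP, if_pos hd, ih (pend ++ [c])]
      cases h : cs.dropWhile (fun c => PySem.Chars.isdigit c) <;> simp
    · have hnil : tokP ([] : List Char) cs = tokenizeB cs := by
        rw [ih [], tokenizeB.eq_def]
        cases h : cs.dropWhile (fun c => PySem.Chars.isdigit c) <;> simp [h]
      rw [tokP, if_neg hd, hnil,
        List.dropWhile_cons_of_neg (by simpa using hd),
        List.takeWhile_cons_of_neg (by simpa using hd)]
      simp

lemma tokP_nil_eq (cs : List Char) : tokP [] cs = tokenizeB cs := by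
  rw [tokP_eq_tokenizeB cs [], tokenizeB]
  cases h : cs.dropWhile (fun c => PySem.Chars.isdigit c) <;> simp [h]

-- ===== VERDICT (by name: the statement is the Claim_ definition above) =====
theorem translate_line_spec : Claim_equal_translate_line := by
  intro line offs _ hpre
  unfold Spec_translate_line translate_line translate_line_alt
  cases hl : line.toList with
  | nil => rfl
  | cons note rest =>
    obtain ⟨r, hr⟩ := foldA_eq offs (if note = 'B' then 4 else 5) line.toList [] [] []
    rw [tokP_nil_eq] at hr
    simp only [hl] at hr ⊢
    rw [hr]
    simp
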